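-- pv_equiv track=rewrite | github.com/anditopramadika/UraiRajutRemedial | UraiRajut.py | urai
-- ===== SOURCE A (Python) =====
-- def urai(kata):
--     # Membuat variabel a untuk looping 1 (ascending)
--     a = ''
--     # Membuat variabel b untuk looping 2 (descending)
--     b = ''
--
--     # Membuat looping ascending
--     for i in range(len(kata)):
--         for j in range(0,i+1):
--             a += kata[j]
--
--     # Membuat looping ascending yang di reverse
--     for k in range(len(kata)):
--         # dari 0 sampai k karena yang paling akhir tidak di print lagi
--         for l in range(0,k):
--             b += kata[l]
--
--     # Print Hasil dari Looping ascending dan descending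
--     return a + b
-- ===== SOURCE B (Python) =====
-- def urai(kata):
--     # One linear pass maintaining the running prefix p:
--     # b collects prefixes of length 0..n-1, a collects prefixes of length 1..n.
--     a = ''
--     b = ''
--     p = ''
--     for c in kata:
--         b += p
--         p += c
--         a += p
--     return a + b
-- ===== Notes on version B (the rewrite author's own statement) =====
-- stated objective: faster
-- what changed: Replaced the two nested index loops that rebuild every prefix character by character with a single pass over the string that maintains the running prefix as state and appends it to both accumulators.
import Mathlib
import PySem

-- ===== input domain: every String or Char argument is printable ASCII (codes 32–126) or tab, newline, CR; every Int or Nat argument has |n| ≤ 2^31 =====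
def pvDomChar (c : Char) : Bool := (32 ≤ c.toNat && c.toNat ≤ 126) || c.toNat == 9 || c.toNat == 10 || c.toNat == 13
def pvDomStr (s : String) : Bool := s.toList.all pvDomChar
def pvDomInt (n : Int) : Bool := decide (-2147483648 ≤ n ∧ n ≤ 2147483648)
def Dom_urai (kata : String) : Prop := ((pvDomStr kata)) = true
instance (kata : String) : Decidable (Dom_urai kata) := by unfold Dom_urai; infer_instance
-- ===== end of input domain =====

-- B replaces A's nested prefix-rebuilding loops by one pass that maintains the running prefix (faster in a timing run's mechanism: removes the inner index loop).

-- ===== PORT A =====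
def urai (kata : String) : String :=
  let a : List Char := (PySem.List.pyRange 0 (PySem.Str.len kata) 1).foldl (fun a i =>
    (PySem.List.pyRange 0 (i + 1) 1).foldl (fun a j => a ++ [(PySem.Str.pyGet? kata j).getD ' ']) a) []
  let b : List Char := (PySem.List.pyRange 0 (PySem.Str.len kata) 1).foldl (fun b k =>
    (PySem.List.pyRange 0 k 1).foldl (fun b l => b ++ [(PySem.Str.pyGet? kata l).getD ' ']) b) []
  String.ofList (a ++ b)

-- ===== PORT B =====
def uraiStep (s : List Char × List Char × List Char) (c : Char) : List Char × List Char × List Char :=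
  let p' := s.2.2 ++ [c]
  (s.1 ++ p', s.2.1 ++ s.2.2, p')

def urai_alt (kata : String) : String :=
  let r := kata.toList.foldl uraiStep ([], [], [])
  String.ofList (r.1 ++ r.2.1)

-- ===== PRECONDITION & SPEC =====
def Spec_urai (kata : String) (out : String) : Prop := out = urai_alt kata
instance (kata : String) (out : String) : Decidable (Spec_urai kata out) := by unfold Spec_urai; infer_instance

-- ===== CLAIM (what is proved, stated in full; the proofs are below) =====
def Claim_equal_urai : Prop := ∀ (kata : String), Dom_urai kata → Spec_urai kata (urai kata)

-- ===== LEMMAS AND PROOFS =====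

-- concatenation of the prefixes of lengths 1..n (resp. 0..n-1) of l
def joinPref (l : List Char) (n : Nat) : List Char :=
  (List.range n).foldl (fun acc i => acc ++ l.take (i + 1)) []

def joinPref0 (l : List Char) (n : Nat) : List Char :=
  (List.range n).foldl (fun acc i => acc ++ l.take i) []

theorem innerA (kata : String) (m : Nat) (hm : m ≤ kata.toList.length) (a0 : List Char) :
    (PySem.List.pyRange 0 (m : Int) 1).foldl
      (fun a j => a ++ [(PySem.Str.pyGet? kata j).getD ' ']) a0
    = a0 ++ kata.toList.take m := by
  induction m with
  | zero => simp [PySem.List.pyRange]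
  | succ m ih =>
    have h : ((m + 1 : Nat) : Int) = (m : Int) + 1 := by push_cast; ring
    rw [h, PySem.List.pyRange_one_succ_right (by positivity), List.foldl_append,
        ih (by omega)]
    have hlt : m < kata.toList.length := by omega
    simp only [List.foldl_cons, List.foldl_nil, PySem.Str.pyGet?_natCast,
      List.getElem?_eq_getElem hlt, Option.getD_some, List.take_add_one,
      Option.toList_some, List.append_assoc]

theorem outerA (kata : String) (n : Nat) (hn : n ≤ kata.toList.length) (a0 : List Char) :
    (PySem.List.pyRange 0 (n : Int) 1).foldl
      (fun a i => (PySem.List.pyRange 0 (i + 1) 1).foldl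
        (fun a j => a ++ [(PySem.Str.pyGet? kata j).getD ' ']) a) a0
    = a0 ++ joinPref kata.toList n := by
  induction n with
  | zero => simp [PySem.List.pyRange, joinPref]
  | succ n ih =>
    have h : ((n + 1 : Nat) : Int) = (n : Int) + 1 := by push_cast; ring
    rw [h, PySem.List.pyRange_one_succ_right (by positivity), List.foldl_append,
        ih (by omega)]
    have h2 : ((n : Int) + 1) = ((n + 1 : Nat) : Int) := by push_cast; ring
    simp only [List.foldl_cons, List.foldl_nil]
    rw [h2, innerA kata (n + 1) (by omega)]
    simp [joinPref, List.range_succ, List.append_assoc]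

theorem outerA0 (kata : String) (n : Nat) (hn : n ≤ kata.toList.length) (a0 : List Char) :
    (PySem.List.pyRange 0 (n : Int) 1).foldl
      (fun b k => (PySem.List.pyRange 0 k 1).foldl
        (fun b l => b ++ [(PySem.Str.pyGet? kata l).getD ' ']) b) a0
    = a0 ++ joinPref0 kata.toList n := by
  induction n with
  | zero => simp [PySem.List.pyRange, joinPref0]
  | succ n ih =>
    have h : ((n + 1 : Nat) : Int) = (n : Int) + 1 := by push_cast; ring
    rw [h, PySem.List.pyRange_one_succ_right (by positivity), List.foldl_append,
        ih (by omega)]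
    simp only [List.foldl_cons, List.foldl_nil]
    rw [innerA kata n (by omega)]
    simp [joinPref0, List.range_succ, List.append_assoc]

theorem joinPref_snoc (l : List Char) (c : Char) :
    joinPref (l ++ [c]) (l.length + 1) = joinPref l l.length ++ (l ++ [c]) := by
  unfold joinPref
  rw [List.range_succ, List.foldl_append]
  have hc : ∀ (acc : List Char), ∀ i ∈ List.range l.length,
      acc ++ (l ++ [c]).take (i + 1) = acc ++ l.take (i + 1) := by
    intro acc i hi
    rw [List.mem_range] at hi
    rw [List.take_append_of_le_length (by omega)]
  rw [PySem.List.foldl_congr_mem _ _ _ _ hc]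
  simp

theorem joinPref0_snoc (l : List Char) (c : Char) :
    joinPref0 (l ++ [c]) (l.length + 1) = joinPref0 l l.length ++ l := by
  unfold joinPref0
  rw [List.range_succ, List.foldl_append]
  have hc : ∀ (acc : List Char), ∀ i ∈ List.range l.length,
      acc ++ (l ++ [c]).take i = acc ++ l.take i := by
    intro acc i hi
    rw [List.mem_range] at hi
    rw [List.take_append_of_le_length (by omega)]
  rw [PySem.List.foldl_congr_mem _ _ _ _ hc]
  simp

theorem Bfold (l : List Char) :
    l.foldl uraiStep ([], [], []) = (joinPref l l.length, joinPref0 l l.length, l) := by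
  induction l using List.reverseRecOn with
  | nil => simp [joinPref, joinPref0]
  | append_singleton l c ih =>
    rw [List.foldl_append, ih]
    simp [uraiStep, joinPref_snoc, joinPref0_snoc]

-- ===== VERDICT (by name: the statement is the Claim_ definition above) =====
theorem urai_spec : Claim_equal_urai := by
  intro kata _
  unfold Spec_urai urai urai_alt
  have hlen : PySem.Str.len kata = (kata.toList.length : Int) := by
    simp [PySem.Str.len_eq]
  rw [hlen, Bfold kata.toList,
      outerA kata kata.toList.length le_rfl [],
      outerA0 kata kata.toList.length le_rfl []]
  simp
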